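-- pv_equiv track=rewrite | github.com/jondscott21/algo-book | chapter-1/page-22.py | previous_lengths
-- ===== SOURCE A (Python) =====
-- def previous_lengths(arr):
--     prev = None
--     for i in range(len(arr)):
--         temp = prev
--         prev = arr[i]
--         if temp is None:
--             arr[i] = temp
--         else:
--             arr[i] = len(temp)
--     return arr
-- ===== SOURCE B (Python) =====
-- def previous_lengths(arr):
--     if arr:
--         arr[1:] = [len(x) for x in arr[:-1]]
--         arr[0] = None
--     return arr
-- ===== Notes on version B (the rewrite author's own statement) =====
-- stated objective: simpler
-- what changed: replaces the prev/temp state-threading index loop with a guarded arr[0]=None plus one slice assignment from a comprehension over arr[:-1]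
import Mathlib
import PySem

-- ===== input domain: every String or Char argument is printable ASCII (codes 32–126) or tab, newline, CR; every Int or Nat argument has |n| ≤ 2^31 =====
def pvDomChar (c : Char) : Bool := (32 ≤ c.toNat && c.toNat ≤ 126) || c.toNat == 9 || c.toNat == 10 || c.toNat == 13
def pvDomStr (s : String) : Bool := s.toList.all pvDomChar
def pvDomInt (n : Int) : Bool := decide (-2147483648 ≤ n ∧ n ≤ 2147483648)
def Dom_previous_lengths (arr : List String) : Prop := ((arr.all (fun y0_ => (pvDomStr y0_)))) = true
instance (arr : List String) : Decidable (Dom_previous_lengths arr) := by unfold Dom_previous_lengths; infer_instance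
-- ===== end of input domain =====

-- B replaces A's prev/temp state-threading loop with a slice assignment from a comprehension
-- (objective: simpler). Both A and B mutate arr in place the same way; equivalence here is about the return value.


-- ===== PORT A =====
-- 'for i in range(len(arr)): temp = prev; prev = arr[i]; arr[i] = … ' — each cell is read
-- before it is written and never read again, so the loop is a fold over arr threading
-- (prev, cells written so far); branches in the original order.
def pvStepA (st : Option String × List (Option Int)) (x : String) : Option String × List (Option Int) :=
  let temp := st.1
  let prev := some x
  match temp with
  | none => (prev, st.2 ++ [none])
  | some t => (prev, st.2 ++ [some ((PySem.Str.len t : Int))])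

def previous_lengths (arr : List String) : List (Option Int) :=
  (arr.foldl pvStepA (none, [])).2

-- ===== PORT B =====
-- 'if arr: arr[1:] = [len(x) for x in arr[:-1]]; arr[0] = None'; arr[:-1] is
-- PySem.List.slice arr none (some (-1)).
def previous_lengths_alt (arr : List String) : List (Option Int) :=
  match arr with
  | [] => []
  | _ :: _ =>
      none :: (PySem.List.slice arr none (some (-1))).map (fun x => (some (PySem.Str.len x : Int) : Option Int))

-- ===== PRECONDITION & SPEC =====
def Spec_previous_lengths (arr : List String) (out : List (Option Int)) : Prop := out = previous_lengths_alt arr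
instance (arr : List String) (out : List (Option Int)) : Decidable (Spec_previous_lengths arr out) := by unfold Spec_previous_lengths; infer_instance

-- ===== CLAIM (what is proved, stated in full; the proofs are below) =====
def Claim_equal_previous_lengths : Prop := ∀ (arr : List String), Dom_previous_lengths arr → Spec_previous_lengths arr (previous_lengths arr)

-- ===== LEMMAS AND PROOFS =====
lemma pvStepA_some (l : List String) : ∀ (t : String) (acc : List (Option Int)),
    (l.foldl pvStepA (some t, acc)).2
      = acc ++ ((t :: l).dropLast).map (fun x => (some (PySem.Str.len x : Int) : Option Int)) := by
  induction l with
  | nil => intro t acc; simp [List.foldl]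
  | cons x xs ih =>
      intro t acc
      simp only [List.foldl, pvStepA]
      rw [ih]
      cases xs <;> simp

-- ===== VERDICT (by name: the statement is the Claim_ definition above) =====
theorem previous_lengths_spec : Claim_equal_previous_lengths := by
  intro arr _
  unfold Spec_previous_lengths previous_lengths previous_lengths_alt
  cases arr with
  | nil => rfl
  | cons x xs =>
      simp only [List.foldl, pvStepA]
      rw [pvStepA_some]
      rw [PySem.List.slice_to_neg_one]
      rfl
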